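-- pv_equiv track=rewrite | github.com/Rome-1/get-research-done | src/grd/core/lean/render_proof.py | _narrative_to_latex
-- ===== SOURCE A (Python) =====
-- def _narrative_to_latex(text: str) -> str:
--     """Translate the shared narrative (Markdown-ish) into LaTeX markup.
--
--     The narrative is authored with ``**bold**`` and ``` `code` ``` so the
--     Markdown renderer can pass it through unchanged. For LaTeX we swap
--     those primitives for ``\\textbf{...}`` and ``\\texttt{...}`` and then
--     escape the remaining special characters.
--     """
--     out: list[str] = []
--     i = 0
--     n = len(text)
--     while i < n:
--         if text.startswith("**", i):
--             end = text.find("**", i + 2)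
--             if end != -1:
--                 out.append("\\textbf{")
--                 out.append(_latex_escape(text[i + 2 : end]))
--                 out.append("}")
--                 i = end + 2
--                 continue
--         if text[i] == "`":
--             end = text.find("`", i + 1)
--             if end != -1:
--                 out.append("\\texttt{")
--                 out.append(_latex_escape(text[i + 1 : end]))
--                 out.append("}")
--                 i = end + 1
--                 continue
--         out.append(_latex_escape(text[i]))
--         i += 1
--     return "".join(out)
--
-- _LATEX_ESCAPES = {
--     "\\": r"\textbackslash{}",
--     "&": r"\&",
--     "%": r"\%",
--     "$": r"\$",
--     "#": r"\#",
--     "_": r"\_",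
--     "{": r"\{",
--     "}": r"\}",
--     "~": r"\textasciitilde{}",
--     "^": r"\textasciicircum{}",
-- }
--
-- def _latex_escape(text: str) -> str:
--     return "".join(_LATEX_ESCAPES.get(ch, ch) for ch in text)
-- ===== SOURCE B (Python) =====
-- import re
--
-- _LATEX_ESCAPES = {
--     "\\": r"\textbackslash{}",
--     "&": r"\&",
--     "%": r"\%",
--     "$": r"\$",
--     "#": r"\#",
--     "_": r"\_",
--     "{": r"\{",
--     "}": r"\}",
--     "~": r"\textasciitilde{}",
--     "^": r"\textasciicircum{}",
-- }
--
-- def _latex_escape(text: str) -> str: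
--     return "".join(_LATEX_ESCAPES.get(ch, ch) for ch in text)
--
-- _MARKUP = re.compile(r"\*\*(.*?)\*\*|`([^`]*)`|.", re.DOTALL)
--
-- def _narrative_to_latex(text: str) -> str:
--     def repl(m: "re.Match[str]") -> str:
--         bold, code = m.group(1), m.group(2)
--         if bold is not None:
--             return "\\textbf{" + _latex_escape(bold) + "}"
--         if code is not None:
--             return "\\texttt{" + _latex_escape(code) + "}"
--         return _latex_escape(m.group(0))
--     return _MARKUP.sub(repl, text)
-- ===== Notes on version B (the rewrite author's own statement) =====
-- stated objective: idiomatic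
-- what changed: Replaces A's hand-rolled index/find scanning loop with a single compiled regex alternation (bold | code | any char, DOTALL) applied via re.sub with a function replacement; the Lean port of B is a structural recursion on the character list with a partition helper mirroring the regex's leftmost, alternation-ordered, lazy-body matching.
import Mathlib
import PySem

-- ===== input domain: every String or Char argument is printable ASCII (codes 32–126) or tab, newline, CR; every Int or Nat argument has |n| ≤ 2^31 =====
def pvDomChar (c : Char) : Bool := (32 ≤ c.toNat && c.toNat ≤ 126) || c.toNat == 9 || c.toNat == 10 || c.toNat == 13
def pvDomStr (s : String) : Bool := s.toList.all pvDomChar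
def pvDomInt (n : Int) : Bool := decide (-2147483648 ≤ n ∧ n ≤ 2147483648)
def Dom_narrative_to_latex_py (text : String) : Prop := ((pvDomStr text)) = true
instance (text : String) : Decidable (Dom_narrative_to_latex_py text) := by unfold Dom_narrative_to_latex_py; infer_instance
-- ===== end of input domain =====

-- B replaces A's hand-rolled index/find scanning loop by a single regex alternation
-- (bold | code | any char) applied with re.sub (objective: idiomatic; same return value).

-- shared table: _LATEX_ESCAPES.get(ch, ch) (the same dict backs A's and B's _latex_escape)
def pvEscChar (c : Char) : List Char :=
  if c = '\\' then "\\textbackslash{}".toList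
  else if c = '&' then "\\&".toList
  else if c = '%' then "\\%".toList
  else if c = '$' then "\\$".toList
  else if c = '#' then "\\#".toList
  else if c = '_' then "\\_".toList
  else if c = '{' then "\\{".toList
  else if c = '}' then "\\}".toList
  else if c = '~' then "\\textasciitilde{}".toList
  else if c = '^' then "\\textasciicircum{}".toList
  else [c]

-- _latex_escape: "".join(_LATEX_ESCAPES.get(ch, ch) for ch in text)
def pvEscape (s : List Char) : List Char := (s.map pvEscChar).flatten

-- termination helpers for the two ports (cited in decreasing_by)
theorem pvBoldBound {l : List Char} {i : Nat}
    (h : PySem.Chars.startswith (l.drop i) ['*','*'] = true) (hi : i < l.length) :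
    i + 2 ≤ l.length := by
  have h1 := ((PySem.Chars.startswith_iff _ _).mp h).length_le
  simp at h1
  omega

theorem pvFindFromLower (l sub : List Char) (k : Nat) (hk : k ≤ l.length)
    (h : PySem.Chars.findFrom l sub ((k : Nat) : Int) ≠ -1) :
    ((k : Nat) : Int) ≤ PySem.Chars.findFrom l sub ((k : Nat) : Int) :=
  (PySem.Chars.findFrom_natCast_spec l sub k hk h).1

-- ===== PORT A =====
-- A's while loop over index i; text.startswith("**", i) is startswith on the drop-i suffix,
-- text.find(sub, j) is Chars.findFrom, text[i] (always in range here, i < n) is List.pyGet?.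
def pvALoop (l : List Char) (i : Nat) : List Char :=
  if h : i < l.length then
    if hb : PySem.Chars.startswith (l.drop i) ['*','*'] = true then
      if he : PySem.Chars.findFrom l ['*','*'] ((i : Int) + 2) ≠ -1 then
        "\\textbf{".toList
          ++ pvEscape (PySem.List.slice l (some ((i : Int) + 2))
                (some (PySem.Chars.findFrom l ['*','*'] ((i : Int) + 2))))
          ++ ['}']
          ++ pvALoop l ((PySem.Chars.findFrom l ['*','*'] ((i : Int) + 2)).toNat + 2)
      else -- no closing "**": fall through to the backtick check, exactly as A's nested ifs do
        if hc : PySem.List.pyGet? l (i : Int) = some '`' then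
          if hf : PySem.Chars.findFrom l ['`'] ((i : Int) + 1) ≠ -1 then
            "\\texttt{".toList
              ++ pvEscape (PySem.List.slice l (some ((i : Int) + 1))
                    (some (PySem.Chars.findFrom l ['`'] ((i : Int) + 1))))
              ++ ['}']
              ++ pvALoop l ((PySem.Chars.findFrom l ['`'] ((i : Int) + 1)).toNat + 1)
          else (PySem.List.pyGet? l (i : Int)).elim [] pvEscChar ++ pvALoop l (i + 1)
        else (PySem.List.pyGet? l (i : Int)).elim [] pvEscChar ++ pvALoop l (i + 1)
    else
      if hc : PySem.List.pyGet? l (i : Int) = some '`' then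
        if hf : PySem.Chars.findFrom l ['`'] ((i : Int) + 1) ≠ -1 then
          "\\texttt{".toList
            ++ pvEscape (PySem.List.slice l (some ((i : Int) + 1))
                  (some (PySem.Chars.findFrom l ['`'] ((i : Int) + 1))))
            ++ ['}']
            ++ pvALoop l ((PySem.Chars.findFrom l ['`'] ((i : Int) + 1)).toNat + 1)
        else (PySem.List.pyGet? l (i : Int)).elim [] pvEscChar ++ pvALoop l (i + 1)
      else (PySem.List.pyGet? l (i : Int)).elim [] pvEscChar ++ pvALoop l (i + 1)
  else []
termination_by l.length - i
decreasing_by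
  · have hk : i + 2 ≤ l.length := pvBoldBound hb h
    have he' : PySem.Chars.findFrom l ['*','*'] (((i + 2 : Nat)) : Int) ≠ -1 := by
      push_cast; exact_mod_cast he
    have := pvFindFromLower l ['*','*'] (i + 2) hk he'
    push_cast at this
    omega
  · have hk : i + 1 ≤ l.length := by omega
    have hf' : PySem.Chars.findFrom l ['`'] (((i + 1 : Nat)) : Int) ≠ -1 := by
      push_cast; exact_mod_cast hf
    have := pvFindFromLower l ['`'] (i + 1) hk hf'
    push_cast at this
    omega
  · omega
  · omega
  · have hk : i + 1 ≤ l.length := by omega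
    have hf' : PySem.Chars.findFrom l ['`'] (((i + 1 : Nat)) : Int) ≠ -1 := by
      push_cast; exact_mod_cast hf
    have := pvFindFromLower l ['`'] (i + 1) hk hf'
    push_cast at this
    omega
  · omega
  · omega

def narrative_to_latex_py (text : String) : String :=
  String.ofList (pvALoop text.toList 0)

-- ===== PORT B =====
-- B's regex r"\*\*(.*?)\*\*|`([^`]*)`|." with re.DOTALL, applied by re.sub: at every position the
-- alternatives are tried in order; the lazy bold body and the [^`]* code body end at the FIRST
-- closing delimiter (= a partition at the first occurrence of the closer); '.' consumes one char.
-- Ported exactly as that matching discipline: structural recursion with a first-occurrence split.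

-- first-occurrence split: pvPartition sep s = some (head, tail) with s = head ++ sep ++ tail
-- at the first occurrence of sep; none if sep does not occur (sep is nonempty here)
def pvPartition (sep : List Char) : List Char → Option (List Char × List Char)
  | [] => if sep.isEmpty then some ([], []) else none
  | c :: rest =>
    if sep.isPrefixOf (c :: rest) then some ([], (c :: rest).drop sep.length)
    else (pvPartition sep rest).map (fun p => (c :: p.1, p.2))

-- termination helper for pvBLoop (cited in decreasing_by)
theorem pvPartition_tail_lt (sep : List Char) (hsep : sep ≠ []) :
    ∀ s h t, pvPartition sep s = some (h, t) → t.length < s.length := by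
  intro s
  induction s with
  | nil =>
    intro h t hp
    simp [pvPartition, List.isEmpty_iff, hsep] at hp
  | cons c rest ih =>
    intro h t hp
    by_cases hpre : sep.isPrefixOf (c :: rest)
    · simp [pvPartition, hpre] at hp
      have hlen : 1 ≤ sep.length := by
        cases sep with
        | nil => exact absurd rfl hsep
        | cons a b => simp
      rcases hp with ⟨h1, h2⟩
      subst h2
      simp
      omega
    · cases hrec : pvPartition sep rest with
      | none => simp [pvPartition, hpre, hrec] at hp
      | some p =>
        rcases p with ⟨h', t'⟩
        have := ih h' t' hrec
        simp [pvPartition, hpre, hrec] at hp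
        rcases hp with ⟨-, ht⟩
        subst ht
        simp
        omega

def pvBLoop (s : List Char) : List Char :=
  match s with
  | [] => []
  | c :: rest =>
    if List.isPrefixOf ['*','*'] (c :: rest) then
      match hp : pvPartition ['*','*'] ((c :: rest).drop 2) with
      | some (body, t) => "\\textbf{".toList ++ pvEscape body ++ ['}'] ++ pvBLoop t
      | none => pvEscChar c ++ pvBLoop rest
    else if c = '`' then
      match hp : pvPartition ['`'] rest with
      | some (body, t) => "\\texttt{".toList ++ pvEscape body ++ ['}'] ++ pvBLoop t
      | none => pvEscChar c ++ pvBLoop rest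
    else pvEscChar c ++ pvBLoop rest
termination_by s.length
decreasing_by
  · have := pvPartition_tail_lt ['*','*'] (by simp) _ _ _ hp
    simp at this ⊢; omega
  · simp
  · have := pvPartition_tail_lt ['`'] (by simp) _ _ _ hp
    simp at this ⊢; omega
  · simp
  · simp

def narrative_to_latex_py_alt (text : String) : String :=
  String.ofList (pvBLoop text.toList)

-- ===== PRECONDITION & SPEC =====
def Spec_narrative_to_latex_py (text : String) (out : String) : Prop := out = narrative_to_latex_py_alt text
instance (text : String) (out : String) : Decidable (Spec_narrative_to_latex_py text out) := by unfold Spec_narrative_to_latex_py; infer_instance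

-- ===== CLAIM (what is proved, stated in full; the proofs are below) =====
def Claim_equal_narrative_to_latex_py : Prop := ∀ (text : String), Dom_narrative_to_latex_py text → Spec_narrative_to_latex_py text (narrative_to_latex_py text)

-- ===== LEMMAS AND PROOFS =====

theorem pvPartition_none_iff (sep : List Char) (hsep : sep ≠ []) :
    ∀ s, pvPartition sep s = none ↔ ¬ sep <:+: s := by
  intro s
  induction s with
  | nil =>
    simp [pvPartition, List.isEmpty_iff, hsep]
  | cons c rest ih =>
    by_cases hpre : sep.isPrefixOf (c :: rest)
    · simp [pvPartition, hpre]
      exact List.IsPrefix.isInfix (List.isPrefixOf_iff_prefix.mp hpre)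
    · simp [pvPartition, hpre, Option.map_eq_none_iff, ih, List.infix_cons_iff]
      intro h
      exact fun hc => hpre (List.isPrefixOf_iff_prefix.mpr hc)

theorem pvPartition_some_spec (sep : List Char) (hsep : sep ≠ []) :
    ∀ s h t, pvPartition sep s = some (h, t) →
      h ++ sep ++ t = s ∧ (∀ j < h.length, ¬ sep <+: s.drop j) ∧ sep <+: s.drop h.length := by
  intro s
  induction s with
  | nil => intro h t hp; simp [pvPartition, List.isEmpty_iff, hsep] at hp
  | cons c rest ih =>
    intro h t hp
    by_cases hpre : sep.isPrefixOf (c :: rest)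
    · have hpre' := List.isPrefixOf_iff_prefix.mp hpre
      simp [pvPartition, hpre] at hp
      rcases hp with ⟨h1, h2⟩
      subst h1; subst h2
      refine ⟨?_, by simp, by simpa using hpre'⟩
      simp
      exact (List.prefix_iff_eq_append.mp hpre')
    · cases hrec : pvPartition sep rest with
      | none => simp [pvPartition, hpre, hrec] at hp
      | some p =>
        rcases p with ⟨h', t'⟩
        obtain ⟨e1, e2, e3⟩ := ih h' t' hrec
        simp [pvPartition, hpre, hrec] at hp
        rcases hp with ⟨hh, ht⟩
        subst hh; subst ht
        refine ⟨by simpa using e1, ?_, by simpa using e3⟩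
        intro j hj
        cases j with
        | zero => simpa using fun hc => hpre (List.isPrefixOf_iff_prefix.mpr hc)
        | succ j' => simpa using e2 j' (by simpa using hj)

theorem pvPartition_eq_of_find (sep : List Char) (hsep : sep ≠ []) (s : List Char)
    (hf : 0 ≤ PySem.Chars.find s sep) :
    pvPartition sep s = some (s.take (PySem.Chars.find s sep).toNat,
      s.drop ((PySem.Chars.find s sep).toNat + sep.length)) := by
  have hinf : sep <:+: s := (PySem.Chars.find_nonneg_iff s sep).mp hf
  cases hp : pvPartition sep s with
  | none => exact absurd ((pvPartition_none_iff sep hsep s).mp hp) (not_not_intro hinf)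
  | some p =>
    rcases p with ⟨h, t⟩
    obtain ⟨e1, e2, e3⟩ := pvPartition_some_spec sep hsep s h t hp
    obtain ⟨f1, f2⟩ := PySem.Chars.find_spec (s := s) (sub := sep) hf
    have hlen : h.length = (PySem.Chars.find s sep).toNat := by
      rcases lt_trichotomy h.length (PySem.Chars.find s sep).toNat with hlt | heq | hgt
      · exact absurd e3 (f2 _ hlt)
      · exact heq
      · exact absurd f1 (e2 _ hgt)
    have hh : h = s.take (PySem.Chars.find s sep).toNat := by
      have hpre : h <+: s := ⟨sep ++ t, by simpa using e1⟩
      rw [List.prefix_iff_eq_take.mp hpre, hlen]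
    have htl : t = s.drop ((PySem.Chars.find s sep).toNat + sep.length) := by
      have hdrop : s.drop (h.length + sep.length) = t := by
        rw [← e1]
        rw [show h ++ sep ++ t = (h ++ sep) ++ t by simp]
        simpa using List.drop_left (l₁ := h ++ sep) (l₂ := t)
      rw [← hlen, hdrop]
    rw [hh, htl]


-- unfolding equations for pvBLoop, one per regex alternative
theorem pvBLoop_nil : pvBLoop [] = [] := by rw [pvBLoop]

theorem pvBLoop_bold (c : Char) (rest body t : List Char)
    (hpre : List.isPrefixOf ['*','*'] (c :: rest) = true)
    (hp : pvPartition ['*','*'] ((c :: rest).drop 2) = some (body, t)) :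
    pvBLoop (c :: rest) = "\\textbf{".toList ++ pvEscape body ++ ['}'] ++ pvBLoop t := by
  rw [pvBLoop]
  simp only [hpre, if_true]
  split
  · next b' t' hp' => rw [hp'] at hp; injection hp with hpeq; injection hpeq with e1 e2; rw [e1, e2]
  · next hp' => rw [hp'] at hp; cases hp

theorem pvBLoop_bold_none (c : Char) (rest : List Char)
    (hpre : List.isPrefixOf ['*','*'] (c :: rest) = true)
    (hp : pvPartition ['*','*'] ((c :: rest).drop 2) = none) :
    pvBLoop (c :: rest) = pvEscChar c ++ pvBLoop rest := by
  rw [pvBLoop]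
  simp only [hpre, if_true]
  split
  · next b' t' hp' => rw [hp'] at hp; cases hp
  · next hp' => rfl

theorem pvBLoop_code (c : Char) (rest body t : List Char)
    (hpre : ¬ List.isPrefixOf ['*','*'] (c :: rest) = true) (hc : c = '`')
    (hp : pvPartition ['`'] rest = some (body, t)) :
    pvBLoop (c :: rest) = "\\texttt{".toList ++ pvEscape body ++ ['}'] ++ pvBLoop t := by
  subst hc
  rw [pvBLoop, if_neg hpre, if_pos rfl]
  split
  · next b' t' hp' => rw [hp'] at hp; injection hp with hpeq; injection hpeq with e1 e2; rw [e1, e2]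
  · next hp' => rw [hp'] at hp; cases hp

theorem pvBLoop_code_none (c : Char) (rest : List Char)
    (hpre : ¬ List.isPrefixOf ['*','*'] (c :: rest) = true) (hc : c = '`')
    (hp : pvPartition ['`'] rest = none) :
    pvBLoop (c :: rest) = pvEscChar c ++ pvBLoop rest := by
  subst hc
  rw [pvBLoop, if_neg hpre, if_pos rfl]
  split
  · next b' t' hp' => rw [hp'] at hp; cases hp
  · next hp' => rfl

theorem pvBLoop_default (c : Char) (rest : List Char)
    (hpre : ¬ List.isPrefixOf ['*','*'] (c :: rest) = true) (hc : c ≠ '`') :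
    pvBLoop (c :: rest) = pvEscChar c ++ pvBLoop rest := by
  rw [pvBLoop, if_neg hpre, if_neg (by simpa using hc)]

theorem pvALoop_eq_pvBLoop (l : List Char) (i : Nat) :
    pvALoop l i = pvBLoop (l.drop i) := by
  suffices H : ∀ m i, l.length - i ≤ m → pvALoop l i = pvBLoop (l.drop i) from H _ i le_rfl
  intro m
  induction m with
  | zero =>
    intro i hi
    rw [pvALoop, dif_neg (by omega), List.drop_eq_nil_of_le (by omega), pvBLoop_nil]
  | succ m ih =>
    intro i hi
    by_cases h : i < l.length
    case neg =>
      rw [pvALoop, dif_neg h, List.drop_eq_nil_of_le (by omega), pvBLoop_nil]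
    case pos =>
    have hdrop : l.drop i = l[i] :: l.drop (i + 1) := List.drop_eq_getElem_cons h
    have hget : PySem.List.pyGet? l (i : Int) = some l[i] := by simp [h]
    rw [pvALoop, dif_pos h]
    by_cases hb : PySem.Chars.startswith (l.drop i) ['*','*'] = true
    · rw [dif_pos hb]
      have hbpre : ['*','*'] <+: l[i] :: l.drop (i + 1) := by
        rw [← hdrop]; exact (PySem.Chars.startswith_iff _ _).mp hb
      have hk2 : i + 2 ≤ l.length := pvBoldBound hb h
      have hcast : ((i : Int) + 2) = (((i + 2 : Nat)) : Int) := by push_cast; ring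
      have hff := PySem.Chars.findFrom_natCast l ['*','*'] (i + 2) hk2
      rw [← hcast] at hff
      have hdd : (l.drop i).drop 2 = l.drop (i + 2) := by rw [List.drop_drop]
      by_cases he : PySem.Chars.findFrom l ['*','*'] ((i : Int) + 2) ≠ -1
      · rw [dif_pos he]
        set f := PySem.Chars.find (l.drop (i + 2)) ['*','*'] with hfdef
        have hfne : f ≠ -1 := by intro h0; rw [hff, if_pos h0] at he; exact he rfl
        have hf0 : 0 ≤ f := by
          have := PySem.Chars.neg_one_le_find (l.drop (i + 2)) ['*','*']
          rw [← hfdef] at this; omega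
        have heval : PySem.Chars.findFrom l ['*','*'] ((i : Int) + 2) = ((i : Int) + 2) + f := by
          rw [hff, if_neg hfne, hcast]
        have hpart := pvPartition_eq_of_find ['*','*'] (by simp) (l.drop (i + 2)) hf0
        have htoNat : (PySem.Chars.findFrom l ['*','*'] ((i : Int) + 2)).toNat = i + 2 + f.toNat := by
          rw [heval]; omega
        have hslice : PySem.List.slice l (some ((i : Int) + 2))
            (some (PySem.Chars.findFrom l ['*','*'] ((i : Int) + 2))) =
            (l.drop (i + 2)).take f.toNat := by
          rw [PySem.List.slice_toNat l (by omega) (by rw [heval]; omega), htoNat,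
            show ((i : Int) + 2).toNat = i + 2 by omega,
            show i + 2 + f.toNat - (i + 2) = f.toNat by omega]
        rw [hdrop]
        rw [pvBLoop_bold l[i] (l.drop (i+1)) ((l.drop (i + 2)).take f.toNat)
              ((l.drop (i + 2)).drop (f.toNat + 2))
              (List.isPrefixOf_iff_prefix.mpr hbpre)
              (by rw [← hdrop, hdd]; simpa using hpart)]
        rw [hslice]
        have hrec : pvALoop l ((PySem.Chars.findFrom l ['*','*'] ((i : Int) + 2)).toNat + 2) =
            pvBLoop ((l.drop (i + 2)).drop (f.toNat + 2)) := by
          rw [htoNat, List.drop_drop, ih (i + 2 + f.toNat + 2) (by omega),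
            show (i + 2) + (f.toNat + 2) = i + 2 + f.toNat + 2 by omega]
        rw [hrec]
      · rw [dif_neg he]
        rw [not_not] at he
        have hfeq : PySem.Chars.find (l.drop (i + 2)) ['*','*'] = -1 := by
          by_contra h0
          rw [hff, if_neg h0] at he
          have := PySem.Chars.neg_one_le_find (l.drop (i + 2)) ['*','*']
          omega
        have hnone : pvPartition ['*','*'] ((l.drop i).drop 2) = none := by
          rw [hdd, pvPartition_none_iff ['*','*'] (by simp)]
          rw [← PySem.Chars.find_eq_neg_one_iff]
          exact hfeq
        -- the current char is '*', so the backtick test fails and A takes the default branch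
        have hstar : l[i] = '*' := by
          obtain ⟨t0, ht0⟩ := hbpre
          have := congrArg List.head? ht0.symm
          simp at this
          rw [List.getElem?_eq_getElem h] at this
          exact Option.some.inj this
        rw [dif_neg (by rw [hget, hstar]; simp)]
        rw [hdrop]
        rw [pvBLoop_bold_none l[i] (l.drop (i+1))
              (List.isPrefixOf_iff_prefix.mpr hbpre) (by rw [← hdrop]; exact hnone)]
        rw [hget, ih (i + 1) (by omega)]
        rfl
    · rw [dif_neg hb]
      have hnpre : ¬ List.isPrefixOf ['*','*'] (l[i] :: l.drop (i + 1)) = true := by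
        intro hc0
        exact hb ((PySem.Chars.startswith_iff _ _).mpr (by rw [hdrop]; exact List.isPrefixOf_iff_prefix.mp hc0))
      by_cases hc : PySem.List.pyGet? l (i : Int) = some '`'
      · rw [dif_pos hc]
        have hcc : l[i] = '`' := by rw [hget] at hc; injection hc
        have hk1 : i + 1 ≤ l.length := by omega
        have hcast : ((i : Int) + 1) = (((i + 1 : Nat)) : Int) := by push_cast; ring
        have hff := PySem.Chars.findFrom_natCast l ['`'] (i + 1) hk1
        rw [← hcast] at hff
        by_cases hf : PySem.Chars.findFrom l ['`'] ((i : Int) + 1) ≠ -1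
        · rw [dif_pos hf]
          set f := PySem.Chars.find (l.drop (i + 1)) ['`'] with hfdef
          have hfne : f ≠ -1 := by intro h0; rw [hff, if_pos h0] at hf; exact hf rfl
          have hf0 : 0 ≤ f := by
            have := PySem.Chars.neg_one_le_find (l.drop (i + 1)) ['`']
            rw [← hfdef] at this; omega
          have heval : PySem.Chars.findFrom l ['`'] ((i : Int) + 1) = ((i : Int) + 1) + f := by
            rw [hff, if_neg hfne, hcast]
          have hpart := pvPartition_eq_of_find ['`'] (by simp) (l.drop (i + 1)) hf0
          have htoNat : (PySem.Chars.findFrom l ['`'] ((i : Int) + 1)).toNat = i + 1 + f.toNat := by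
            rw [heval]; omega
          have hslice : PySem.List.slice l (some ((i : Int) + 1))
              (some (PySem.Chars.findFrom l ['`'] ((i : Int) + 1))) =
              (l.drop (i + 1)).take f.toNat := by
            rw [PySem.List.slice_toNat l (by omega) (by rw [heval]; omega), htoNat,
              show ((i : Int) + 1).toNat = i + 1 by omega,
              show i + 1 + f.toNat - (i + 1) = f.toNat by omega]
          rw [hdrop]
          rw [pvBLoop_code l[i] (l.drop (i+1)) ((l.drop (i + 1)).take f.toNat)
                ((l.drop (i + 1)).drop (f.toNat + 1)) hnpre hcc
                (by simpa using hpart)]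
          rw [hslice]
          have hrec : pvALoop l ((PySem.Chars.findFrom l ['`'] ((i : Int) + 1)).toNat + 1) =
              pvBLoop ((l.drop (i + 1)).drop (f.toNat + 1)) := by
            rw [htoNat, List.drop_drop, ih (i + 1 + f.toNat + 1) (by omega),
              show (i + 1) + (f.toNat + 1) = i + 1 + f.toNat + 1 by omega]
          rw [hrec]
        · rw [dif_neg hf]
          rw [not_not] at hf
          have hfeq : PySem.Chars.find (l.drop (i + 1)) ['`'] = -1 := by
            by_contra h0
            rw [hff, if_neg h0] at hf
            have := PySem.Chars.neg_one_le_find (l.drop (i + 1)) ['`']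
            omega
          have hnone : pvPartition ['`'] (l.drop (i + 1)) = none := by
            rw [pvPartition_none_iff ['`'] (by simp), ← PySem.Chars.find_eq_neg_one_iff]
            exact hfeq
          rw [hdrop, pvBLoop_code_none l[i] (l.drop (i+1)) hnpre hcc hnone]
          rw [hget, ih (i + 1) (by omega)]
          rfl
      · rw [dif_neg hc]
        have hcc : l[i] ≠ '`' := by intro h0; rw [hget, h0] at hc; exact hc rfl
        rw [hdrop, pvBLoop_default l[i] (l.drop (i+1)) hnpre hcc]
        rw [hget, ih (i + 1) (by omega)]
        rfl

-- ===== VERDICT (by name: the statement is the Claim_ definition above) =====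
theorem narrative_to_latex_py_spec : Claim_equal_narrative_to_latex_py := by
  intro text _
  unfold Spec_narrative_to_latex_py narrative_to_latex_py narrative_to_latex_py_alt
  rw [pvALoop_eq_pvBLoop]
  simp
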